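-- pv_equiv track=rewrite | github.com/zenamons-s/unit-economy | services/financial_system/scenario_simulator.py | _find_breakeven_month
-- ===== SOURCE A (Python) =====
-- from typing import Dict, List, Optional, Any, Tuple, Callable
--
-- def _find_breakeven_month(monthly_results: List[Dict]) -> Optional[int]:
--     """Нахождение месяца breakeven"""
--
--     for i, month in enumerate(monthly_results):
--         if month["cash_flow"] >= 0:
--             # Проверяем что все последующие месяцы также positive
--             future_positive = all(
--                 m["cash_flow"] >= 0
--                 for m in monthly_results[i:min(i+3, len(monthly_results))]
--             )
--
--             if future_positive:
--                 return i + 1  # Month numbers start from 1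
--
--     return None
-- ===== SOURCE B (Python) =====
-- from typing import Dict, List, Optional
--
--
-- def _find_breakeven_month(monthly_results: List[Dict]) -> Optional[int]:
--     """Single forward pass with a streak counter instead of per-candidate window re-scans."""
--     start = 0
--     streak = 0
--     for i, month in enumerate(monthly_results):
--         if month["cash_flow"] >= 0:
--             if streak == 0:
--                 start = i
--             streak += 1
--             if streak == 3:
--                 return start + 1
--         else:
--             streak = 0
--     if streak > 0:
--         return start + 1
--     return None
-- ===== Notes on version B (the rewrite author's own statement) =====
-- stated objective: alternative
-- what changed: Replaces the per-candidate clamped 3-month window re-scan with a single forward pass maintaining the start and length of the current non-negative streak.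
-- outside the precondition, e.g. on _find_breakeven_month([{'cash_flow': 0}, {'cash_flow': 0}, {'cash_flow': 0}, {}]): A returns 1, B returns 1
import Mathlib
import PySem

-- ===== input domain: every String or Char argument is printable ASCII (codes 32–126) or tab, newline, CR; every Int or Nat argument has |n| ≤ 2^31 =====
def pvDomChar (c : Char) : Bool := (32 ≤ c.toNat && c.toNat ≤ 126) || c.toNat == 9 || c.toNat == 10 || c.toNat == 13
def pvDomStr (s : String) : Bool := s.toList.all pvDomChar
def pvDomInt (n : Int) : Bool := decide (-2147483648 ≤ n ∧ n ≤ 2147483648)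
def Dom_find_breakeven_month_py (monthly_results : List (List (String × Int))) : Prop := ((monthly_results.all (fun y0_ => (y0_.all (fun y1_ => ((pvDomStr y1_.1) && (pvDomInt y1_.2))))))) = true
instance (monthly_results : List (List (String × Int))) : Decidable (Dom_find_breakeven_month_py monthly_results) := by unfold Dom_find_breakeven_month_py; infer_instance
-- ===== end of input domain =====

-- B replaces A's per-candidate 3-month window re-scan by one forward pass with a streak counter (alternative decomposition, same O(n) cost).

-- ===== PORT A =====
-- month["cash_flow"] >= 0 (first-match dict lookup; a missing key raises KeyError in Python and is excluded by Pre_)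
def pvCFpos (m : List (String × Int)) : Bool :=
  match List.lookup "cash_flow" m with
  | some v => decide (0 ≤ v)
  | none => false

-- the 'for i, month in enumerate(...)' loop with its early return
def pvA_loop (mr : List (List (String × Int))) : Nat → List (List (String × Int)) → Option Int
  | _, [] => none
  | i, month :: rest =>
    if pvCFpos month then
      -- all(m["cash_flow"] >= 0 for m in monthly_results[i:min(i+3, len(monthly_results))])
      if (PySem.List.slice mr (some (i : Int)) (some (min ((i : Int) + 3) (mr.length : Int)))).all pvCFpos then
        some ((i : Int) + 1)
      else pvA_loop mr (i + 1) rest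
    else pvA_loop mr (i + 1) rest

def find_breakeven_month_py (monthly_results : List (List (String × Int))) : Option Int :=
  pvA_loop monthly_results 0 monthly_results

-- ===== PORT B =====
-- single forward pass: start of the current non-negative streak and its length
def pvB_loop : List (List (String × Int)) → Nat → Nat → Nat → Option Int
  | [], _, start, streak => if streak > 0 then some ((start : Int) + 1) else none
  | month :: rest, i, start, streak =>
    if pvCFpos month then
      let start' := if streak = 0 then i else start
      if streak + 1 = 3 then some ((start' : Int) + 1)
      else pvB_loop rest (i + 1) start' (streak + 1)
    else pvB_loop rest (i + 1) start 0

def find_breakeven_month_py_alt (monthly_results : List (List (String × Int))) : Option Int :=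
  pvB_loop monthly_results 0 0 0

-- ===== PRECONDITION & SPEC =====
-- Pre_ excludes inputs in which some month dict lacks the key "cash_flow": Python A raises
-- KeyError on any such month it inspects before returning. The exclusion is slightly wider than
-- the crash set: on a key-less month lying past the returned index both programs still return
-- the same value (see the cited example in the claim).
def Pre_find_breakeven_month_py (monthly_results : List (List (String × Int))) : Prop :=
  ∀ month ∈ monthly_results, (List.lookup "cash_flow" month).isSome
instance (monthly_results : List (List (String × Int))) : Decidable (Pre_find_breakeven_month_py monthly_results) := by unfold Pre_find_breakeven_month_py; infer_instance
def pvWitness_find_breakeven_month_py : (List (List (String × Int))) := [[("cash_flow", 5)], [("cash_flow", -2)]]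

def Spec_find_breakeven_month_py (monthly_results : List (List (String × Int))) (out : Option Int) : Prop := out = find_breakeven_month_py_alt monthly_results
instance (monthly_results : List (List (String × Int))) (out : Option Int) : Decidable (Spec_find_breakeven_month_py monthly_results out) := by unfold Spec_find_breakeven_month_py; infer_instance

-- ===== CLAIM (what is proved, stated in full; the proofs are below) =====
def Claim_equal_find_breakeven_month_py : Prop := ∀ (monthly_results : List (List (String × Int))), Dom_find_breakeven_month_py monthly_results → Pre_find_breakeven_month_py monthly_results → Spec_find_breakeven_month_py monthly_results (find_breakeven_month_py monthly_results)

-- ===== LEMMAS AND PROOFS =====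

-- window predicate: the clamped window starting at k is all non-negative
def pvP (mr : List (List (String × Int))) (k : Nat) : Bool :=
  ((mr.drop k).take 3).all pvCFpos

-- reference: first index ≥ k whose window is all non-negative, 1-based
def pvFirstQ (mr : List (List (String × Int))) (k : Nat) : Option Int :=
  if h : k < mr.length then
    if pvP mr k then some ((k : Int) + 1) else pvFirstQ mr (k + 1)
  else none
termination_by mr.length - k

theorem pvSlice_eq_window (mr : List (List (String × Int))) (i : Nat) :
    PySem.List.slice mr (some (i : Int)) (some (min ((i : Int) + 3) (mr.length : Int)))
      = (mr.drop i).take 3 := by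
  have h1 : (min ((i : Int) + 3) (mr.length : Int)) = ((min (i + 3) mr.length : Nat) : Int) := by
    push_cast; rfl
  rw [h1, PySem.List.slice_natCast]
  rw [List.take_eq_take_iff]
  simp [List.length_drop]
  omega

theorem pvA_loop_eq_firstQ (mr : List (List (String × Int))) :
    ∀ rest i, mr.drop i = rest → pvA_loop mr i rest = pvFirstQ mr i := by
  intro rest
  induction rest with
  | nil =>
    intro i h
    have hni : mr.length ≤ i := by
      by_contra hlt
      have := List.drop_eq_nil_iff.mp h
      omega
    rw [pvFirstQ]
    simp [pvA_loop, Nat.not_lt.mpr hni]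
  | cons month rest ih =>
    intro i h
    have hlt : i < mr.length := by
      by_contra hge
      rw [List.drop_eq_nil_of_le (by omega)] at h
      simp at h
    have hrest : mr.drop (i + 1) = rest := by
      rw [← List.drop_drop, h, List.drop_one, List.tail_cons]
    have hwin : (mr.drop i).take 3 = month :: rest.take 2 := by
      rw [h]; rfl
    rw [pvFirstQ]
    simp only [dif_pos hlt]
    by_cases hc : pvCFpos month
    · simp only [pvA_loop, if_pos hc, pvSlice_eq_window, pvP]
      by_cases hall : ((mr.drop i).take 3).all pvCFpos
      · simp [hall]
      · simp [hall, ih (i + 1) hrest]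
    · have hp : pvP mr i = false := by
        simp [pvP, hwin, hc]
      simp [pvA_loop, hc, hp, ih (i + 1) hrest]

-- skipping one failing index in the reference
theorem pvFirstQ_skip (mr : List (List (String × Int))) (k : Nat)
    (hp : pvP mr k = false) : pvFirstQ mr k = pvFirstQ mr (k + 1) := by
  rw [pvFirstQ]
  by_cases h : k < mr.length
  · simp [h, hp]
  · rw [pvFirstQ]
    have : ¬ k + 1 < mr.length := by omega
    simp [h, this]

-- a failing month inside the window makes pvP false
theorem pvP_false_of_mem (mr : List (List (String × Int))) (k j : Nat) (month : List (String × Int))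
    (hj : j < 3) (hget : (mr.drop k)[j]? = some month) (hc : pvCFpos month = false) :
    pvP mr k = false := by
  have hmem : month ∈ (mr.drop k).take 3 := by
    have hg : ((mr.drop k).take 3)[j]? = some month := by
      simp [hj, hget]
    exact List.mem_of_getElem? hg
  rw [pvP, List.all_eq_false]
  exact ⟨month, hmem, by simp [hc]⟩

theorem pvB_loop_eq_firstQ (mr : List (List (String × Int))) :
    ∀ rest i s start, mr.drop i = rest → i ≤ mr.length → s < 3 → s ≤ i →
      (0 < s → start = i - s) →
      ((mr.drop (i - s)).take s).all pvCFpos = true →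
      pvB_loop rest i start s = pvFirstQ mr (i - s) := by
  intro rest
  induction rest with
  | nil =>
    intro i s start h hi hs3 hsi hstart hrun
    have hlen : mr.length ≤ i := by
      by_contra hlt
      have := List.drop_eq_nil_iff.mp h
      omega
    have hieq : i = mr.length := by omega
    by_cases hz : 0 < s
    · have hq : pvP mr (i - s) = true := by
        have hlen2 : (mr.drop (i - s)).length = s := by
          rw [List.length_drop]; omega
        have : (mr.drop (i - s)).take 3 = mr.drop (i - s) := by
          apply List.take_of_length_le; omega
        have h2 : (mr.drop (i - s)).take s = mr.drop (i - s) := by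
          apply List.take_of_length_le; omega
        rw [pvP, this, ← h2]; exact hrun
      rw [pvFirstQ]
      have hlt2 : i - s < mr.length := by omega
      have hst : start = i - s := hstart hz
      simp [pvB_loop, hz, hlt2, hq, hst]
    · have hs0 : s = 0 := by omega
      subst hs0
      rw [pvFirstQ]
      simp [pvB_loop, Nat.not_lt.mpr hlen]
  | cons month rest ih =>
    intro i s start h hi hs3 hsi hstart hrun
    have hlt : i < mr.length := by
      by_contra hge
      rw [List.drop_eq_nil_of_le (by omega)] at h
      simp at h
    have hrest : mr.drop (i + 1) = rest := by
      rw [← List.drop_drop, h, List.drop_one, List.tail_cons]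
    have hgeti : mr[i]? = some month := by
      have : (mr.drop i)[0]? = some month := by rw [h]; rfl
      simpa using this
    have hdropget : ∀ t : Nat, t ≤ i → (mr.drop (i - t))[t]? = some month := by
      intro t ht
      rw [List.getElem?_drop]
      have : i - t + t = i := by omega
      rw [this]; exact hgeti
    by_cases hc : pvCFpos month
    · -- month non-negative
      have hrun' : ((mr.drop (i + 1 - (s + 1))).take (s + 1)).all pvCFpos = true := by
        have he : i + 1 - (s + 1) = i - s := by omega
        rw [he]
        have hts : (mr.drop (i - s)).take (s + 1)
            = (mr.drop (i - s)).take s ++ ((mr.drop (i - s))[s]?).toList := by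
          exact List.take_add_one
        rw [hts, List.all_append, hrun]
        have := hdropget s hsi
        simp [this, hc]
      by_cases h3 : s + 1 = 3
      · -- streak reaches 3: B returns start' + 1 where start' = i - 2
        have hs2 : s = 2 := by omega
        subst hs2
        have hst : start = i - 2 := hstart (by omega)
        have hq : pvP mr (i - 2) = true := by
          have hlen2 : 3 ≤ (mr.drop (i - 2)).length := by
            rw [List.length_drop]; omega
          have hts : (mr.drop (i - 2)).take 3
              = (mr.drop (i - 2)).take 2 ++ ((mr.drop (i - 2))[2]?).toList := by
            exact List.take_add_one
          rw [pvP, hts, List.all_append]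
          have := hdropget 2 (by omega)
          simp only [this, Option.toList_some, List.all_cons, List.all_nil, hc]
          simp only [Bool.and_true] at *
          exact hrun
        rw [pvFirstQ]
        have hlt2 : i - 2 < mr.length := by omega
        simp [pvB_loop, hst, hlt2, hq, hc]
      · -- streak grows
        have hstep : pvB_loop (month :: rest) i start s
            = pvB_loop rest (i + 1) (if s = 0 then i else start) (s + 1) := by
          simp [pvB_loop, hc, h3]
        rw [hstep]
        have hst' : (if s = 0 then i else start) = i + 1 - (s + 1) := by
          by_cases hz : s = 0
          · simp [hz]
          · rw [if_neg hz, hstart (by omega)]; omega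
        rw [hst']
        have := ih (i + 1) (s + 1) (i + 1 - (s + 1)) hrest (by omega) (by omega) (by omega)
          (fun _ => rfl) hrun'
        rw [this]
        have : i + 1 - (s + 1) = i - s := by omega
        rw [this]
    · -- month negative: every window starting in [i-s, i] contains this month
      have hskip : ∀ t : Nat, t ≤ s → pvFirstQ mr (i - t) = pvFirstQ mr (i + 1) := by
        intro t
        induction t with
        | zero =>
          intro _
          have hp : pvP mr i = false :=
            pvP_false_of_mem mr i 0 month (by omega) (by simpa using hgeti) (by simp [hc])
          simpa using pvFirstQ_skip mr i hp
        | succ t iht =>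
          intro ht
          have hp : pvP mr (i - (t + 1)) = false := by
            apply pvP_false_of_mem mr (i - (t + 1)) (t + 1) month (by omega) _ (by simp [hc])
            exact hdropget (t + 1) (by omega)
          rw [pvFirstQ_skip mr (i - (t + 1)) hp]
          have : i - (t + 1) + 1 = i - t := by omega
          rw [this]
          exact iht (by omega)
      have hstep : pvB_loop (month :: rest) i start s = pvB_loop rest (i + 1) start 0 := by
        simp [pvB_loop, hc]
      rw [hstep]
      have := ih (i + 1) 0 start hrest (by omega) (by omega) (by omega)
        (by omega) (by simp)
      rw [this]
      have h1 : i + 1 - 0 = i + 1 := by omega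
      rw [h1]
      exact (hskip s (le_refl s)).symm

-- ===== VERDICT (by name: the statement is the Claim_ definition above) =====
theorem find_breakeven_month_py_spec : Claim_equal_find_breakeven_month_py := by
  intro mr _ _
  unfold Spec_find_breakeven_month_py find_breakeven_month_py find_breakeven_month_py_alt
  rw [pvA_loop_eq_firstQ mr mr 0 rfl]
  rw [pvB_loop_eq_firstQ mr mr 0 0 0 rfl (by omega) (by omega) (by omega) (by omega) (by simp)]
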